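-- pv_equiv track=rewrite | github.com/sergeylobachev/leetcode | Problems/3219.py | solution
-- ===== SOURCE A (Python) =====
-- def solution(m, n, h, v):
--     h.sort()
--     v.sort()
--
--     hi = len(h) - 1
--     vi = len(v) - 1
--
--     hm = 1
--     vm = 1
--
--     ans = 0
--
--     while hi >= 0 and vi >= 0:
--         if h[hi] >= v[vi]:
--             ans += h[hi] * vm
--             hm += 1
--             hi -= 1
--         else:
--             ans += v[vi] * hm
--             vm += 1
--             vi -= 1
--
--     while vi >= 0:
--         ans += v[vi] * hm
--         vi -= 1
--
--     while hi >= 0: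
--         ans += h[hi] * vm
--         hi -= 1
--
--     return ans
-- ===== SOURCE B (Python) =====
-- def solution(m, n, h, v):
--     # keep the in-place sorting side effect of A; the value below does not depend on order
--     h.sort()
--     v.sort()
--     ans = 0
--     for x in h:
--         ans += x * (1 + sum(1 for y in v if y > x))
--     for y in v:
--         ans += y * (1 + sum(1 for x in h if x >= y))
--     return ans
-- ===== Notes on version B (the rewrite author's own statement) =====
-- stated objective: alternative
-- what changed: Replaces A's descending two-pointer merge with two drain loops by a closed-form double sum: each h-cut x contributes x*(1 + count of v-cuts > x) and each v-cut y contributes y*(1 + count of h-cuts >= y), eliminating the merge and the multiplier state entirely (h.sort()/v.sort() kept only for A's in-place side effect).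
import Mathlib
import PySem

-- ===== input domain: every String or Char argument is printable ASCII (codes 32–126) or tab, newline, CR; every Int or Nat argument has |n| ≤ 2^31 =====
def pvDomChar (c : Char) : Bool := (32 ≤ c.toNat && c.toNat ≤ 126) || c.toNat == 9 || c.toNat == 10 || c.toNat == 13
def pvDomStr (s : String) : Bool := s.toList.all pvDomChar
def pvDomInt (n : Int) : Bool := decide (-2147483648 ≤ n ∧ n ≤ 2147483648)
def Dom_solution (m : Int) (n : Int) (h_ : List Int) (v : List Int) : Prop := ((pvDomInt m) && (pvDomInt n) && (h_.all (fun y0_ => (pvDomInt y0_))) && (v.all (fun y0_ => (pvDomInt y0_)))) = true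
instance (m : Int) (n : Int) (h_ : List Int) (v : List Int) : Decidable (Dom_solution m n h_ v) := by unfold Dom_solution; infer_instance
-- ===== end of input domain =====

-- B computes the same total as a closed-form double sum (each cut's multiplier counted directly)
-- instead of A's descending two-pointer merge; both Pythons sort h and v in place (same side effect),
-- the equivalence proved is about the return value.

-- ===== PORT A =====
-- while vi >= 0: ans += v[vi] * hm; vi -= 1
def solutionDrainV (vs : List Int) (vi hm ans : Int) : Int :=
  if 0 ≤ vi then
    solutionDrainV vs (vi - 1) hm (ans + PySem.List.pyGetD vs vi 0 * hm)
  else ans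
termination_by (vi + 1).toNat
decreasing_by omega

-- while hi >= 0: ans += h[hi] * vm; hi -= 1
def solutionDrainH (hs : List Int) (hi vm ans : Int) : Int :=
  if 0 ≤ hi then
    solutionDrainH hs (hi - 1) vm (ans + PySem.List.pyGetD hs hi 0 * vm)
  else ans
termination_by (hi + 1).toNat
decreasing_by omega

-- while hi >= 0 and vi >= 0: …   followed by the two drain loops
def solutionLoop (hs vs : List Int) (hi vi hm vm ans : Int) : Int :=
  if 0 ≤ hi ∧ 0 ≤ vi then
    if PySem.List.pyGetD hs hi 0 ≥ PySem.List.pyGetD vs vi 0 then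
      solutionLoop hs vs (hi - 1) vi (hm + 1) vm (ans + PySem.List.pyGetD hs hi 0 * vm)
    else
      solutionLoop hs vs hi (vi - 1) hm (vm + 1) (ans + PySem.List.pyGetD vs vi 0 * hm)
  else
    solutionDrainH hs hi vm (solutionDrainV vs vi hm ans)
termination_by (hi + vi + 2).toNat
decreasing_by all_goals omega

def solution (m : Int) (n : Int) (h_ : List Int) (v : List Int) : Int :=
  let hs := PySem.List.sorted h_ (fun x => x) false
  let vs := PySem.List.sorted v (fun x => x) false
  solutionLoop hs vs ((hs.length : Int) - 1) ((vs.length : Int) - 1) 1 1 0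

-- ===== PORT B =====
def solution_alt (m : Int) (n : Int) (h_ : List Int) (v : List Int) : Int :=
  let hs := PySem.List.sorted h_ (fun x => x) false
  let vs := PySem.List.sorted v (fun x => x) false
  let ans1 := hs.foldl (fun ans x => ans + x * (1 + (vs.countP (fun y => decide (x < y)) : Int))) 0
  vs.foldl (fun ans y => ans + y * (1 + (hs.countP (fun x => decide (y ≤ x)) : Int))) ans1

-- ===== PRECONDITION & SPEC =====
def Spec_solution (m : Int) (n : Int) (h_ : List Int) (v : List Int) (out : Int) : Prop := out = solution_alt m n h_ v
instance (m : Int) (n : Int) (h_ : List Int) (v : List Int) (out : Int) : Decidable (Spec_solution m n h_ v out) := by unfold Spec_solution; infer_instance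

-- ===== CLAIM (what is proved, stated in full; the proofs are below) =====
def Claim_equal_solution : Prop := ∀ (m : Int) (n : Int) (h_ : List Int) (v : List Int), Dom_solution m n h_ v → Spec_solution m n h_ v (solution m n h_ v)

-- ===== LEMMAS AND PROOFS =====

-- the closed-form total over the remaining prefixes, with current multipliers hm vm
def pvF (H V : List Int) (hm vm : Int) : Int :=
  (H.map (fun x => x * (vm + (V.countP (fun y => decide (x < y)) : Int)))).sum
  + (V.map (fun y => y * (hm + (H.countP (fun x => decide (y ≤ x)) : Int)))).sum

lemma pv_le_getElem_of_mem_take (vs : List Int) (hp : vs.Pairwise (· ≤ ·)) (k : Nat)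
    (hk : k < vs.length) (y : Int) (hy : y ∈ vs.take (k + 1)) : y ≤ vs[k] := by
  obtain ⟨i, hi, rfl⟩ := List.getElem_of_mem hy
  rw [List.getElem_take]
  have hik : i ≤ k := by
    have := hi; simp [List.length_take] at this; omega
  rcases Nat.lt_or_ge i k with hlt | hge
  · exact (List.pairwise_iff_getElem.mp hp) i k _ _ hlt
  · have : i = k := le_antisymm hik hge
    subst this; exact le_refl _

lemma pv_drainV_eq (vs : List Int) : ∀ (k : Nat) (vi hm ans : Int), (vi + 1).toNat ≤ k →
    vi < (vs.length : Int) →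
    solutionDrainV vs vi hm ans = ans + ((vs.take (vi + 1).toNat).map (fun y => y * hm)).sum := by
  intro k
  induction k with
  | zero =>
    intro vi hm ans hk hv
    rw [solutionDrainV]
    have h1 : ¬ 0 ≤ vi := by omega
    have h2 : (vi + 1).toNat = 0 := by omega
    simp [h1, h2]
  | succ k ih =>
    intro vi hm ans hk hv
    rw [solutionDrainV]
    by_cases h1 : 0 ≤ vi
    · simp only [h1, if_true]
      rw [ih (vi - 1) hm _ (by omega) (by omega)]
      have htn : vi.toNat < vs.length := by omega
      have h2 : (vi + 1).toNat = vi.toNat + 1 := by omega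
      have h3 : (vi - 1 + 1).toNat = vi.toNat := by omega
      have h4 : vs[vi.toNat]? = some vs[vi.toNat] := List.getElem?_eq_getElem htn
      rw [h2, h3, List.take_succ, h4, PySem.List.pyGetD_eq_getElem vs 0 h1 hv]
      simp only [Option.toList_some, List.map_append, List.map_cons, List.map_nil,
        List.sum_append, List.sum_cons, List.sum_nil]
      ring
    · have h2 : (vi + 1).toNat = 0 := by omega
      simp [h1, h2]

lemma pv_drainH_eq (hs : List Int) : ∀ (k : Nat) (hi vm ans : Int), (hi + 1).toNat ≤ k →
    hi < (hs.length : Int) →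
    solutionDrainH hs hi vm ans = ans + ((hs.take (hi + 1).toNat).map (fun x => x * vm)).sum := by
  intro k
  induction k with
  | zero =>
    intro hi vm ans hk hh
    rw [solutionDrainH]
    have h1 : ¬ 0 ≤ hi := by omega
    have h2 : (hi + 1).toNat = 0 := by omega
    simp [h1, h2]
  | succ k ih =>
    intro hi vm ans hk hh
    rw [solutionDrainH]
    by_cases h1 : 0 ≤ hi
    · simp only [h1, if_true]
      rw [ih (hi - 1) vm _ (by omega) (by omega)]
      have htn : hi.toNat < hs.length := by omega
      have h2 : (hi + 1).toNat = hi.toNat + 1 := by omega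
      have h3 : (hi - 1 + 1).toNat = hi.toNat := by omega
      have h4 : hs[hi.toNat]? = some hs[hi.toNat] := List.getElem?_eq_getElem htn
      rw [h2, h3, List.take_succ, h4, PySem.List.pyGetD_eq_getElem hs 0 h1 hh]
      simp only [Option.toList_some, List.map_append, List.map_cons, List.map_nil,
        List.sum_append, List.sum_cons, List.sum_nil]
      ring
    · have h2 : (hi + 1).toNat = 0 := by omega
      simp [h1, h2]

lemma pvF_snoc_H (H V : List Int) (a hm vm : Int) (ha : ∀ y ∈ V, y ≤ a) :
    pvF (H ++ [a]) V hm vm = a * vm + pvF H V (hm + 1) vm := by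
  unfold pvF
  rw [List.map_append, List.sum_append]
  have h1 : V.countP (fun y => decide (a < y)) = 0 := by
    rw [List.countP_eq_zero]; intro y hy; simpa using not_lt.mpr (ha y hy)
  have h2 : (V.map (fun y => y * (hm + (List.countP (fun x => decide (y ≤ x)) (H ++ [a]) : Int)))).sum
      = (V.map (fun y => y * ((hm + 1) + (List.countP (fun x => decide (y ≤ x)) H : Int)))).sum := by
    apply congrArg
    apply List.map_congr_left
    intro y hy
    rw [List.countP_append]
    have h3 : List.countP (fun x => decide (y ≤ x)) [a] = 1 := by simp [ha y hy]
    rw [h3]; push_cast; ring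
  rw [h2]
  simp only [List.map_cons, List.map_nil, List.sum_cons, List.sum_nil, add_zero]
  rw [h1]
  simp only [Nat.cast_zero]
  ring

lemma pvF_snoc_V (H V : List Int) (b hm vm : Int) (hb : ∀ x ∈ H, x < b) :
    pvF H (V ++ [b]) hm vm = b * hm + pvF H V hm (vm + 1) := by
  unfold pvF
  rw [List.map_append, List.sum_append]
  have h1 : H.countP (fun x => decide (b ≤ x)) = 0 := by
    rw [List.countP_eq_zero]; intro x hx; simpa using not_le.mpr (hb x hx)
  have h2 : (H.map (fun x => x * (vm + (List.countP (fun y => decide (x < y)) (V ++ [b]) : Int)))).sum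
      = (H.map (fun x => x * ((vm + 1) + (List.countP (fun y => decide (x < y)) V : Int)))).sum := by
    apply congrArg
    apply List.map_congr_left
    intro x hx
    rw [List.countP_append]
    have h3 : List.countP (fun y => decide (x < y)) [b] = 1 := by simp [hb x hx]
    rw [h3]; push_cast; ring
  rw [h2]
  simp only [List.map_cons, List.map_nil, List.sum_cons, List.sum_nil, add_zero]
  rw [h1]
  simp only [Nat.cast_zero]
  ring

lemma pv_base (hs vs : List Int) (hi vi hm vm ans : Int)
    (hh : hi < (hs.length : Int)) (hv : vi < (vs.length : Int)) (hng : ¬ (0 ≤ hi ∧ 0 ≤ vi)) :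
    solutionDrainH hs hi vm (solutionDrainV vs vi hm ans)
      = ans + pvF (hs.take (hi + 1).toNat) (vs.take (vi + 1).toNat) hm vm := by
  by_cases hv0 : 0 ≤ vi
  · have hh0 : ¬ 0 ≤ hi := fun h => hng ⟨h, hv0⟩
    rw [solutionDrainH]
    simp only [hh0, if_false]
    rw [pv_drainV_eq vs (vi + 1).toNat vi hm ans le_rfl hv]
    have h2 : (hi + 1).toNat = 0 := by omega
    simp [pvF, h2]
  · rw [solutionDrainV]
    simp only [hv0, if_false]
    rw [pv_drainH_eq hs (hi + 1).toNat hi vm ans le_rfl hh]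
    have h2 : (vi + 1).toNat = 0 := by omega
    simp [pvF, h2]

lemma pv_loop_eq (hs vs : List Int) (hph : hs.Pairwise (· ≤ ·)) (hpv : vs.Pairwise (· ≤ ·)) :
    ∀ (k : Nat) (hi vi hm vm ans : Int), (hi + vi + 2).toNat ≤ k →
    hi < (hs.length : Int) → vi < (vs.length : Int) →
    solutionLoop hs vs hi vi hm vm ans
      = ans + pvF (hs.take (hi + 1).toNat) (vs.take (vi + 1).toNat) hm vm := by
  intro k
  induction k with
  | zero =>
    intro hi vi hm vm ans hk hh hv
    rw [solutionLoop]
    have hng : ¬ (0 ≤ hi ∧ 0 ≤ vi) := by omega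
    simp only [hng, if_false]
    exact pv_base hs vs hi vi hm vm ans hh hv hng
  | succ k ih =>
    intro hi vi hm vm ans hk hh hv
    rw [solutionLoop]
    by_cases hng : 0 ≤ hi ∧ 0 ≤ vi
    · obtain ⟨hh0, hv0⟩ := hng
      have hhn : hi.toNat < hs.length := by omega
      have hvn : vi.toNat < vs.length := by omega
      have hH1 : (hi + 1).toNat = hi.toNat + 1 := by omega
      have hV1 : (vi + 1).toNat = vi.toNat + 1 := by omega
      rw [PySem.List.pyGetD_eq_getElem hs 0 hh0 hh, PySem.List.pyGetD_eq_getElem vs 0 hv0 hv]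
      simp only [ge_iff_le, show (0 ≤ hi ∧ 0 ≤ vi) = True by simp [hh0, hv0], if_true]
      -- every element of the v-prefix is ≤ vs[vi.toNat], of the h-prefix ≤ hs[hi.toNat]
      have hVle : ∀ y ∈ vs.take (vi + 1).toNat, y ≤ vs[vi.toNat] := by
        intro y hy; rw [hV1] at hy; exact pv_le_getElem_of_mem_take vs hpv vi.toNat hvn y hy
      have hHle : ∀ x ∈ hs.take (hi + 1).toNat, x ≤ hs[hi.toNat] := by
        intro x hx; rw [hH1] at hx; exact pv_le_getElem_of_mem_take hs hph hi.toNat hhn x hx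
      by_cases hab : vs[vi.toNat] ≤ hs[hi.toNat]
      · simp only [hab, if_true]
        rw [ih (hi - 1) vi (hm + 1) vm _ (by omega) (by omega) hv]
        have h3 : (hi - 1 + 1).toNat = hi.toNat := by omega
        have h4 : hs[hi.toNat]? = some hs[hi.toNat] := List.getElem?_eq_getElem hhn
        rw [h3, hH1, List.take_succ, h4]
        simp only [Option.toList_some]
        rw [pvF_snoc_H _ _ _ _ _ (fun y hy => le_trans (hVle y hy) hab)]
        ring
      · simp only [hab, if_false]
        rw [ih hi (vi - 1) hm (vm + 1) _ (by omega) hh (by omega)]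
        have h3 : (vi - 1 + 1).toNat = vi.toNat := by omega
        have h4 : vs[vi.toNat]? = some vs[vi.toNat] := List.getElem?_eq_getElem hvn
        rw [h3, hV1, List.take_succ, h4]
        simp only [Option.toList_some]
        rw [pvF_snoc_V _ _ _ _ _ (fun x hx => lt_of_le_of_lt (hHle x hx) (not_le.mp hab))]
        ring
    · simp only [hng, if_false]
      exact pv_base hs vs hi vi hm vm ans hh hv hng

lemma pv_alt_eq_F (m n : Int) (h_ v : List Int) :
    solution_alt m n h_ v
      = pvF (PySem.List.sorted h_ (fun x => x) false) (PySem.List.sorted v (fun x => x) false) 1 1 := by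
  simp only [solution_alt, pvF]
  rw [PySem.List.foldl_add, PySem.List.foldl_add]
  ring

-- ===== VERDICT (by name: the statement is the Claim_ definition above) =====
theorem solution_spec : Claim_equal_solution := by
  intro m n h_ v _
  unfold Spec_solution
  simp only [solution]
  rw [pv_loop_eq (PySem.List.sorted h_ (fun x => x) false) (PySem.List.sorted v (fun x => x) false)
      (PySem.List.sorted_pairwise h_ (fun x => x)) (PySem.List.sorted_pairwise v (fun x => x))
      (((PySem.List.sorted h_ (fun x => x) false).length : Int) - 1
        + (((PySem.List.sorted v (fun x => x) false).length : Int) - 1) + 2).toNat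
      _ _ _ _ _ le_rfl (by omega) (by omega)]
  have h1 : (((PySem.List.sorted h_ (fun x => x) false).length : Int) - 1 + 1).toNat
      = (PySem.List.sorted h_ (fun x => x) false).length := by omega
  have h2 : (((PySem.List.sorted v (fun x => x) false).length : Int) - 1 + 1).toNat
      = (PySem.List.sorted v (fun x => x) false).length := by omega
  rw [h1, h2, List.take_length, List.take_length, pv_alt_eq_F, zero_add]
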